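-- pv_equiv track=rewrite | github.com/nkchangliu/puzzles | leetcode/most_profitable_work.py | most_profit_work
-- ===== SOURCE A (Python) =====
-- def most_profit_work(difficulties, profits, workers):
--     diff_pro = zip(difficulties, profits)
--     diff_pro = sorted(diff_pro)
--     i, total, max_profit = 0, 0, 0
--     workers = sorted(workers)
--     for work in workers:
--         while i in range(len(diff_pro)) and diff_pro[i][0] <= work:
--             max_profit = max(max_profit, diff_pro[i][1])
--             i += 1
--         total += max_profit
--     return total
-- ===== SOURCE B (Python) =====
-- def most_profit_work(difficulties, profits, workers):
--     jobs = list(zip(difficulties, profits))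
--     total = 0
--     for w in workers:
--         best = 0
--         for d, p in jobs:
--             if d <= w and p > best:
--                 best = p
--         total += best
--     return total
-- ===== Notes on version B (the rewrite author's own statement) =====
-- stated objective: simpler
-- what changed: Replaces the sort-both-lists + shared-pointer running-max sweep by a direct sum: each worker independently scans the unsorted jobs for the best profit with difficulty <= ability (floored at 0); no sorting, no pointer, no carried state.
import Mathlib
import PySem

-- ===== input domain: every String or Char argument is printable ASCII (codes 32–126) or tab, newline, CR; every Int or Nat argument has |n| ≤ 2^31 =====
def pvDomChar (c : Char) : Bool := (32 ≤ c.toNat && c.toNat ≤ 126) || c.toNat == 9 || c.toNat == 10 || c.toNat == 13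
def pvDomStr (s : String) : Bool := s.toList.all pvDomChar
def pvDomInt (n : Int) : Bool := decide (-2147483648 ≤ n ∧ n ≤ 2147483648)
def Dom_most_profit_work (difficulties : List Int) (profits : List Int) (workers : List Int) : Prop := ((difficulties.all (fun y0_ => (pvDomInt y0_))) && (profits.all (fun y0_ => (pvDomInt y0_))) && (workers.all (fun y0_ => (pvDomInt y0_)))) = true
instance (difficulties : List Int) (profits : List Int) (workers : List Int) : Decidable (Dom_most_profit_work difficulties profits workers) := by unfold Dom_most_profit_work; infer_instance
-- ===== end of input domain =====

-- B replaces A's sort-both-lists + shared-pointer sweep by an independent per-worker scan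
-- of the unsorted jobs (simpler control flow, no sorting; not claimed faster).

-- ===== PORT A =====
-- the inner 'while i in range(len(diff_pro)) and diff_pro[i][0] <= work' loop
def whileA (dp : List (Int × Int)) (work : Int) (i : Nat) (mp : Int) : Nat × Int :=
  if h : i < dp.length then
    if (dp[i]'h).1 ≤ work then
      whileA dp work (i + 1) (max mp (dp[i]'h).2)
    else (i, mp)
  else (i, mp)
termination_by dp.length - i

def most_profit_work (difficulties : List Int) (profits : List Int) (workers : List Int) : Int :=
  let diff_pro := PySem.List.sorted2 (difficulties.zip profits) Prod.fst Prod.snd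
  let workers' := PySem.List.sorted workers (fun x => x)
  (workers'.foldl (fun st work =>
      let r := whileA diff_pro work st.1 st.2.2
      (r.1, st.2.1 + r.2, r.2)) ((0 : Nat), (0 : Int), (0 : Int))).2.1

-- ===== PORT B =====
-- 'best = 0; for d, p in jobs: if d <= w and p > best: best = p'
def bestFor (jobs : List (Int × Int)) (w : Int) : Int :=
  jobs.foldl (fun best p => if p.1 ≤ w ∧ best < p.2 then p.2 else best) 0

def most_profit_work_alt (difficulties : List Int) (profits : List Int) (workers : List Int) : Int :=
  let jobs := difficulties.zip profits
  workers.foldl (fun total w => total + bestFor jobs w) 0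

-- ===== PRECONDITION & SPEC =====
def Spec_most_profit_work (difficulties : List Int) (profits : List Int) (workers : List Int) (out : Int) : Prop := out = most_profit_work_alt difficulties profits workers
instance (difficulties : List Int) (profits : List Int) (workers : List Int) (out : Int) : Decidable (Spec_most_profit_work difficulties profits workers out) := by unfold Spec_most_profit_work; infer_instance

-- ===== CLAIM (what is proved, stated in full; the proofs are below) =====
def Claim_equal_most_profit_work : Prop := ∀ (difficulties : List Int) (profits : List Int) (workers : List Int), Dom_most_profit_work difficulties profits workers → Spec_most_profit_work difficulties profits workers (most_profit_work difficulties profits workers)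

-- ===== LEMMAS AND PROOFS =====

-- max of snd over a list, floored at the accumulator
def maxP (l : List (Int × Int)) : Int := l.foldl (fun m p => max m p.2) 0

-- insertion keeps a transitive order compatible with the comparator
lemma pairwise_insertBy {α : Type} (before : α → α → Bool) (S : α → α → Prop)
    (htrans : ∀ a b c, S a b → S b c → S a c)
    (h1 : ∀ a b, before a b = true → S a b)
    (h2 : ∀ a b, before a b = false → S b a)
    (x : α) (ys : List α) (hys : ys.Pairwise S) :
    (PySem.List.insertBy before x ys).Pairwise S := by
  induction ys with
  | nil => simp [PySem.List.insertBy]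
  | cons y ys ih =>
    rcases List.pairwise_cons.mp hys with ⟨hy, hys'⟩
    by_cases hb : before x y = true
    · simp only [PySem.List.insertBy, hb, if_pos]
      refine List.pairwise_cons.mpr ⟨?_, hys⟩
      intro z hz
      rcases List.mem_cons.mp hz with rfl | hz
      · exact h1 _ _ hb
      · exact htrans _ _ _ (h1 _ _ hb) (hy _ hz)
    · simp only [PySem.List.insertBy, hb, if_neg, Bool.false_eq_true, not_false_iff]
      refine List.pairwise_cons.mpr ⟨?_, ih hys'⟩
      intro z hz
      rcases (PySem.List.mem_insertBy before x z ys).mp hz with rfl | hz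
      · exact h2 _ _ (by simpa using hb)
      · exact hy _ hz
    
lemma pairwise_foldl_insertBy {α : Type} (before : α → α → Bool) (S : α → α → Prop)
    (htrans : ∀ a b c, S a b → S b c → S a c)
    (h1 : ∀ a b, before a b = true → S a b)
    (h2 : ∀ a b, before a b = false → S b a)
    (xs acc : List α) (hacc : acc.Pairwise S) :
    (xs.foldl (fun acc x => PySem.List.insertBy before x acc) acc).Pairwise S := by
  induction xs generalizing acc with
  | nil => exact hacc
  | cons x xs ih =>
    exact ih _ (pairwise_insertBy before S htrans h1 h2 x acc hacc)

-- sorted2 by (fst, snd) is nondecreasing in fst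
lemma sorted2_pairwise_fst (l : List (Int × Int)) :
    (PySem.List.sorted2 l Prod.fst Prod.snd).Pairwise (fun a b => a.1 ≤ b.1) := by
  have : PySem.List.sorted2 l Prod.fst Prod.snd
      = l.foldl (fun acc x => PySem.List.insertBy
          (fun a b => decide (a.1 < b.1) || (!decide (b.1 < a.1) && decide (a.2 < b.2))) x acc) [] := by
    simp [PySem.List.sorted2]
  rw [this]
  refine pairwise_foldl_insertBy _ _ ?_ ?_ ?_ l [] (List.Pairwise.nil)
  · intro a b c hab hbc; omega
  · intro a b h
    simp only [Bool.or_eq_true, Bool.and_eq_true, decide_eq_true_eq, Bool.not_eq_eq_eq_not,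
      Bool.not_true, decide_eq_false_iff_not] at h
    rcases h with h | ⟨h, _⟩ <;> omega
  · intro a b h
    simp only [Bool.or_eq_false_iff, Bool.and_eq_false_iff, decide_eq_false_iff_not,
      Bool.not_eq_eq_eq_not, Bool.not_false, decide_eq_true_eq] at h
    omega

-- the while loop consumes exactly the takeWhile of the remaining suffix
lemma whileA_eq (dp : List (Int × Int)) (w : Int) (i : Nat) (mp : Int) :
    whileA dp w i mp
      = (i + ((dp.drop i).takeWhile (fun p => decide (p.1 ≤ w))).length,
         ((dp.drop i).takeWhile (fun p => decide (p.1 ≤ w))).foldl (fun m p => max m p.2) mp) := by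
  induction i, mp using whileA.induct dp w with
  | case1 i mp h hle ih =>
    rw [whileA]
    simp only [h, dif_pos, hle, if_pos]
    rw [ih]
    have hdrop : dp.drop i = dp[i] :: dp.drop (i + 1) := List.drop_eq_getElem_cons h
    rw [hdrop, List.takeWhile_cons_of_pos (by simpa using hle)]
    simp [List.foldl_cons]
    omega
  | case2 i mp h hle =>
    rw [whileA]
    simp only [h, dif_pos, hle]
    have hdrop : dp.drop i = dp[i] :: dp.drop (i + 1) := List.drop_eq_getElem_cons h
    rw [hdrop, List.takeWhile_cons_of_neg (by simpa using hle)]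
    simp
  | case3 i mp h =>
    rw [whileA]
    simp only [h, dif_neg, not_false_iff]
    rw [List.drop_eq_nil_of_le (by omega)]
    simp

-- the worker fold, with the processed prefix 'done' made explicit
lemma fold_inv (ws : List Int) (done rest : List (Int × Int)) (total : Int)
    (hdone : ∀ w ∈ ws, ∀ p ∈ done, p.1 ≤ w) (hws : ws.Pairwise (· ≤ ·)) :
    (ws.foldl (fun st work =>
        let r := whileA (done ++ rest) work st.1 st.2.2
        (r.1, st.2.1 + r.2, r.2)) (done.length, total, maxP done)).2.1
      = total + (ws.map (fun w => maxP ((done ++ rest).takeWhile (fun p => decide (p.1 ≤ w))))).sum := by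
  induction ws generalizing done rest total with
  | nil => simp
  | cons w ws ih =>
    rcases List.pairwise_cons.mp hws with ⟨hw, hws'⟩
    have hdw : ∀ p ∈ done, p.1 ≤ w := hdone w (List.mem_cons_self)
    set t := rest.takeWhile (fun p => decide (p.1 ≤ w)) with ht
    have hdoneTW : done.takeWhile (fun p => decide (p.1 ≤ w)) = done :=
      List.takeWhile_eq_self_iff.mpr (by intro p hp; simpa using hdw p hp)
    have hTW : (done ++ rest).takeWhile (fun p => decide (p.1 ≤ w)) = done ++ t := by
      rw [List.takeWhile_append, hdoneTW]; simp [← ht]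
    have hW : whileA (done ++ rest) w done.length (maxP done)
        = ((done ++ t).length, maxP (done ++ t)) := by
      rw [whileA_eq, List.drop_left, ← ht]
      simp [maxP, List.foldl_append]
    have hsplit : done ++ rest = (done ++ t) ++ rest.dropWhile (fun p => decide (p.1 ≤ w)) := by
      rw [List.append_assoc, ht, List.takeWhile_append_dropWhile]
    simp only [List.foldl_cons, hW]
    rw [hsplit]
    rw [ih (done ++ t) (rest.dropWhile (fun p => decide (p.1 ≤ w))) (total + maxP (done ++ t))
        ?_ hws']
    · rw [← hsplit, List.map_cons, List.sum_cons, hTW]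
      ring
    · intro w' hw' p hp
      rcases List.mem_append.mp hp with hp | hp
      · exact hdone w' (List.mem_cons_of_mem _ hw') p hp
      · rw [ht] at hp
        have h1 : p.1 ≤ w := by simpa using List.mem_takeWhile_imp hp
        exact le_trans h1 (hw w' hw')

-- on a list nondecreasing in fst, takeWhile (fst ≤ w) is filter (fst ≤ w)
lemma takeWhile_eq_filter_of_pairwise (l : List (Int × Int)) (w : Int)
    (hl : l.Pairwise (fun a b => a.1 ≤ b.1)) :
    l.takeWhile (fun p => decide (p.1 ≤ w)) = l.filter (fun p => decide (p.1 ≤ w)) := by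
  induction l with
  | nil => rfl
  | cons a l ih =>
    rcases List.pairwise_cons.mp hl with ⟨ha, hl'⟩
    by_cases h : a.1 ≤ w
    · rw [List.takeWhile_cons_of_pos (by simpa using h),
        List.filter_cons_of_pos (by simpa using h), ih hl']
    · rw [List.takeWhile_cons_of_neg (by simpa using h),
        List.filter_cons_of_neg (by simpa using h)]
      symm
      rw [List.filter_eq_nil_iff]
      intro p hp
      have := ha p hp
      simp only [decide_eq_true_eq]
      omega

-- maxP is invariant under permutation (max over snd is left-commutative)
lemma foldl_maxsnd_perm (l₁ l₂ : List (Int × Int)) (h : l₁.Perm l₂) :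
    ∀ (a : Int), l₁.foldl (fun m p => max m p.2) a = l₂.foldl (fun m p => max m p.2) a := by
  induction h with
  | nil => intro a; rfl
  | cons x _ ih => intro a; simp only [List.foldl_cons]; exact ih _
  | swap x y l => intro a; simp only [List.foldl_cons, max_right_comm]
  | trans _ _ ih1 ih2 => intro a; rw [ih1, ih2]

lemma maxP_perm (l₁ l₂ : List (Int × Int)) (h : l₁.Perm l₂) : maxP l₁ = maxP l₂ :=
  foldl_maxsnd_perm l₁ l₂ h 0

-- B's inner scan computes the floored max over the qualifying jobs
lemma bestFor_eq_maxP_filter (jobs : List (Int × Int)) (w : Int) :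
    bestFor jobs w = maxP (jobs.filter (fun p => decide (p.1 ≤ w))) := by
  unfold bestFor maxP
  suffices h : ∀ (m : Int), jobs.foldl (fun best p => if p.1 ≤ w ∧ best < p.2 then p.2 else best) m
      = (jobs.filter (fun p => decide (p.1 ≤ w))).foldl (fun m p => max m p.2) m from h 0
  induction jobs with
  | nil => intro m; rfl
  | cons a l ih =>
    intro m
    by_cases h : a.1 ≤ w
    · rw [List.foldl_cons, List.filter_cons_of_pos (by simpa using h), List.foldl_cons, ih]
      congr 1
      by_cases hm : m < a.2 <;> simp [h, hm] <;> omega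
    · rw [List.foldl_cons, List.filter_cons_of_neg (by simpa using h), ih]
      congr 1
      simp [h]

-- ===== VERDICT (by name: the statement is the Claim_ definition above) =====
theorem most_profit_work_spec : Claim_equal_most_profit_work := by
  intro difficulties profits workers _
  unfold Spec_most_profit_work most_profit_work most_profit_work_alt
  set dp := PySem.List.sorted2 (difficulties.zip profits) Prod.fst Prod.snd with hdp
  set ws := PySem.List.sorted workers (fun x => x) with hws
  have hA := fold_inv ws [] dp 0 (by intro w _ p hp; simp at hp) ?_
  · simp only [List.nil_append, List.length_nil] at hA
    have hmp0 : maxP ([] : List (Int × Int)) = 0 := rfl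
    rw [hmp0] at hA
    rw [hA, zero_add]
    have hpair := sorted2_pairwise_fst (difficulties.zip profits)
    have hperm : dp.Perm (difficulties.zip profits) :=
      PySem.List.sorted2_perm _ _ _ _
    have hmap : ws.map (fun w => maxP (dp.takeWhile (fun p => decide (p.1 ≤ w))))
        = ws.map (fun w => bestFor (difficulties.zip profits) w) := by
      apply List.map_congr_left
      intro w _
      rw [takeWhile_eq_filter_of_pairwise dp w (hdp ▸ hpair)]
      rw [bestFor_eq_maxP_filter]
      exact maxP_perm _ _ (hperm.filter _)
    rw [hmap]
    rw [PySem.List.foldl_add (g := fun w => bestFor (difficulties.zip profits) w), zero_add]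
    have : (ws.map fun w => bestFor (difficulties.zip profits) w).sum
        = (workers.map fun w => bestFor (difficulties.zip profits) w).sum :=
      ((PySem.List.sorted_perm workers (fun x => x) false).map _).sum_eq
    rw [this]
  · have := PySem.List.sorted_pairwise workers (fun x => x)
    simpa using this
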